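-- pv_equiv track=rewrite | github.com/FDGASOUL/C-AFD | test13.py | filter_redundant_dependencies
-- ===== SOURCE A (Python) =====
-- def is_redundant(fd, dependencies):
--     """判断一条FD是否是冗余的（使用闭包计算）"""
--     lhs, rhs = fd
--     closure = set(lhs)
--     # 通过迭代计算闭包
--     changed = True
--     while changed:
--         changed = False
--         for dep_lhs, dep_rhs in dependencies:
--             if set(dep_lhs).issubset(closure) and dep_rhs not in closure:
--                 closure.add(dep_rhs)
--                 changed = True
--     return rhs in closure
--
-- def filter_redundant_dependencies(dependencies):
--     """筛选冗余的函数依赖（带排序优化）"""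
--     # 按左部长度升序排列，相同长度按右部字母排序
--     sorted_deps = sorted(dependencies,
--                          key=lambda x: (len(x[0]), x[1]))
--
--     filtered_dependencies = []
--     for fd in sorted_deps:
--         if not is_redundant(fd, filtered_dependencies):
--             filtered_dependencies.append(fd)
--     return filtered_dependencies
-- ===== SOURCE B (Python) =====
-- def filter_redundant_dependencies(dependencies):
--     sorted_deps = sorted(dependencies, key=lambda x: (len(x[0]), x[1]))
--     kept = []
--     index = {}      # attribute -> positions (in kept) of FDs whose lhs contains it
--     base = []       # base[i] = number of distinct lhs attributes of kept[i]
--     rhs_of = []     # rhs_of[i] = rhs of kept[i]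
--     for lhs, rhs in sorted_deps:
--         # closure of lhs under kept: counter/queue (each attribute processed once)
--         count = base.copy()
--         closure = set(lhs)
--         queue = list(closure)
--         for i, c in enumerate(count):
--             if c == 0 and rhs_of[i] not in closure:
--                 closure.add(rhs_of[i])
--                 queue.append(rhs_of[i])
--         while queue:
--             a = queue.pop()
--             for i in index.get(a, ()):
--                 count[i] -= 1
--                 if count[i] == 0:
--                     r = rhs_of[i]
--                     if r not in closure:
--                         closure.add(r)
--                         queue.append(r)
--         if rhs not in closure:
--             s = set(lhs)
--             pos = len(kept)
--             for x in s:
--                 index.setdefault(x, []).append(pos)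
--             base.append(len(s))
--             rhs_of.append(rhs)
--             kept.append((lhs, rhs))
--     return kept
-- ===== Notes on version B (the rewrite author's own statement) =====
-- stated objective: faster
-- what changed: The pass-until-fixpoint closure is replaced by a counter/queue closure (Beeri-Bernstein): an attribute->FD index, per-FD counters of still-missing distinct lhs attributes and a rhs list are maintained incrementally as FDs are kept, and per candidate a queue processes each derived attribute once, firing an FD when its counter reaches zero.
import Mathlib
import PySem

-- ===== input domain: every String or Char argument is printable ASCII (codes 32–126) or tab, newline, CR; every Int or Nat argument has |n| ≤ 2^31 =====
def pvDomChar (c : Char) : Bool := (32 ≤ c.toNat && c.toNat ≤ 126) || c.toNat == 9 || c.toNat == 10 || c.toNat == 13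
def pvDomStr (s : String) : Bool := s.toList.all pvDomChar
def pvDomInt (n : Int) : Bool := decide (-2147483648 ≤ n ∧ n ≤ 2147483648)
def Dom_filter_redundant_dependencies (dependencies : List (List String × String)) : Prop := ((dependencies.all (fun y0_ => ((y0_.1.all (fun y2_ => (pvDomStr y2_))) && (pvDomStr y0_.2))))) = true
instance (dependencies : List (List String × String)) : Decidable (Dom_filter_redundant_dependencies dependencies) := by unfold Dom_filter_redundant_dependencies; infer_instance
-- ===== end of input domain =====

-- B replaces A's pass-until-fixpoint closure by the counter/queue closure (attribute→FD index,
-- per-FD counter of missing lhs attributes, each derived attribute processed once); objective: faster.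

-- ===== PORT A =====
-- one body of A's 'while changed' loop: a for-pass over dependencies threading (closure, changed)
def pvPassA (deps : List (List String × String)) (st : PySem.Set String × Bool) :
    PySem.Set String × Bool :=
  deps.foldl (fun st dep =>
    if PySem.Set.issubset (PySem.Set.ofList dep.1) st.1 && !(PySem.Set.contains st.1 dep.2)
    then (PySem.Set.add st.1 dep.2, true) else st) st

-- A's 'while changed' loop; fuel deps.length+1 always reaches the fixpoint
-- (each changed pass adds a new element drawn from the rhs's of deps)
def pvClosA (deps : List (List String × String)) : Nat → PySem.Set String → PySem.Set String
  | 0, cl => cl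
  | n+1, cl =>
    let st := pvPassA deps (cl, false)
    if st.2 then pvClosA deps n st.1 else st.1

def pvIsRedundant (fd : List String × String) (deps : List (List String × String)) : Bool :=
  PySem.Set.contains (pvClosA deps (deps.length + 1) (PySem.Set.ofList fd.1)) fd.2

def filter_redundant_dependencies (dependencies : List (List String × String)) :
    List (List String × String) :=
  (PySem.List.sorted2 dependencies (fun x => x.1.length) (fun x => x.2)).foldl
    (fun acc fd => if pvIsRedundant fd acc then acc else acc ++ [fd]) []

-- ===== PORT B =====
-- B's second loop in _closure: FDs whose counter is already zero fire immediately
def pvInitB (count : List Int) (rhs_of : List String)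
    (st : PySem.Set String × List String) : PySem.Set String × List String :=
  (PySem.List.enumerate count 0).foldl
    (fun st ic =>
      if ic.2 == 0 && !(PySem.Set.contains st.1 (PySem.List.pyGetD rhs_of ic.1 "")) then
        (PySem.Set.add st.1 (PySem.List.pyGetD rhs_of ic.1 ""),
         st.2 ++ [PySem.List.pyGetD rhs_of ic.1 ""])
      else st) st

-- body of B's 'for i in index.get(a, ())' loop
def pvStepB (rhs_of : List String) (st : List Int × PySem.Set String × List String) (i : Int) :
    List Int × PySem.Set String × List String :=
  let c := PySem.List.pyGetD st.1 i 0 - 1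
  let count := PySem.List.pySetD st.1 i c
  if c == 0 then
    let r := PySem.List.pyGetD rhs_of i ""
    if !(PySem.Set.contains st.2.1 r) then (count, PySem.Set.add st.2.1 r, st.2.2 ++ [r])
    else (count, st.2.1, st.2.2)
  else (count, st.2.1, st.2.2)

-- B's 'while queue' loop (queue.pop() pops the last element); the fuel
-- attrs.length + kept.length + 1 always outlasts the queue (each pushed
-- attribute enters the closure exactly once)
def pvLoopB (index : PySem.Dict String (List Int)) (rhs_of : List String) :
    Nat → List Int → PySem.Set String → List String → PySem.Set String
  | 0, _, cl, _ => cl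
  | n+1, count, cl, queue =>
    match queue with
    | [] => cl
    | x :: rest =>
      let a := (x :: rest).getLast (List.cons_ne_nil x rest)
      let st := (index.getD a []).foldl (pvStepB rhs_of) (count, cl, (x :: rest).dropLast)
      pvLoopB index rhs_of n st.1 st.2.1 st.2.2

-- B's main loop: the state carries kept plus the incrementally maintained
-- index / base counters / rhs list; per candidate the closure starts from a
-- copy of the base counters and the queue = list(closure), the set's list
-- (iterating the set s to extend the index is order-safe: the index is only
-- looked up afterwards)
def filter_redundant_dependencies_alt (dependencies : List (List String × String)) :
    List (List String × String) :=
  ((PySem.List.sorted2 dependencies (fun x => x.1.length) (fun x => x.2)).foldl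
    (fun st fd =>
      let cl0 := PySem.Set.ofList fd.1
      let init := pvInitB st.2.2.1 st.2.2.2 (cl0, cl0)
      let cl := pvLoopB st.2.1 st.2.2.2 (fd.1.length + st.1.length + 1) st.2.2.1 init.1 init.2
      if PySem.Set.contains cl fd.2 then st
      else
        let s := PySem.Set.ofList fd.1
        (st.1 ++ [fd],
         s.foldl (fun d x => d.insert x (d.getD x [] ++ [(st.1.length : Int)])) st.2.1,
         st.2.2.1 ++ [(s.length : Int)], st.2.2.2 ++ [fd.2]))
    ([], PySem.Dict.empty, [], [])).1

-- ===== PRECONDITION & SPEC =====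
def Spec_filter_redundant_dependencies (dependencies : List (List String × String)) (out : List (List String × String)) : Prop := out = filter_redundant_dependencies_alt dependencies
instance (dependencies : List (List String × String)) (out : List (List String × String)) : Decidable (Spec_filter_redundant_dependencies dependencies out) := by unfold Spec_filter_redundant_dependencies; infer_instance

-- ===== CLAIM (what is proved, stated in full; the proofs are below) =====
def Claim_equal_filter_redundant_dependencies : Prop := ∀ (dependencies : List (List String × String)), Dom_filter_redundant_dependencies dependencies → Spec_filter_redundant_dependencies dependencies (filter_redundant_dependencies dependencies)

-- ===== LEMMAS AND PROOFS =====

-- C is closed under the dependencies ds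
def pvClosed (ds : List (List String × String)) (C : List String) : Prop :=
  ∀ p ∈ ds, (∀ a ∈ p.1, a ∈ C) → p.2 ∈ C

-- ---- A side ----
theorem pvPassA_mono (ds : List (List String × String)) (st : PySem.Set String × Bool)
    (x : String) (hx : x ∈ st.1) : x ∈ (pvPassA ds st).1 := by
  induction ds generalizing st with
  | nil => simpa [pvPassA] using hx
  | cons d t ih =>
    simp only [pvPassA, List.foldl_cons] at *
    apply ih
    split
    · exact (PySem.Set.mem_add _ _ _).2 (Or.inl hx)
    · exact hx

theorem pvPassA_sound (ds : List (List String × String)) (st : PySem.Set String × Bool)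
    (D : List String) (hD : pvClosed ds D) (h : ∀ x ∈ st.1, x ∈ D) :
    ∀ x ∈ (pvPassA ds st).1, x ∈ D := by
  suffices hgen : ∀ (ds : List (List String × String)) (st : PySem.Set String × Bool),
      pvClosed ds D → (∀ x ∈ st.1, x ∈ D) → ∀ x ∈ (pvPassA ds st).1, x ∈ D by
    exact hgen ds st hD h
  intro ds
  induction ds with
  | nil => intro st _ h; simpa [pvPassA]
  | cons d t ih =>
    intro st hD h
    simp only [pvPassA, List.foldl_cons] at *
    refine ih _ (fun p hp => hD p (List.mem_cons_of_mem _ hp)) ?_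
    intro x hx
    split at hx
    · rename_i hcond
      rcases (PySem.Set.mem_add _ _ _).1 hx with h1 | h1
      · exact h _ h1
      · subst h1
        simp only [Bool.and_eq_true] at hcond
        refine hD d List.mem_cons_self ?_
        intro a ha
        exact h _ ((PySem.Set.issubset_iff _ _).1 hcond.1 a ((PySem.Set.mem_ofList _ _).2 ha))
    · exact h _ hx

theorem pvPassA_false (ds : List (List String × String)) (cl : PySem.Set String)
    (h : (pvPassA ds (cl, false)).2 = false) :
    (pvPassA ds (cl, false)).1 = cl ∧ pvClosed ds cl := by
  suffices hgen : ∀ (ds : List (List String × String)) (st : PySem.Set String × Bool),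
      (pvPassA ds st).2 = false → st.2 = false ∧ (pvPassA ds st).1 = st.1 ∧ pvClosed ds st.1 by
    obtain ⟨-, h1, h2⟩ := hgen ds (cl, false) h
    exact ⟨h1, h2⟩
  intro ds
  induction ds with
  | nil =>
    intro st h
    exact ⟨h, rfl, fun p hp => absurd hp (List.not_mem_nil)⟩
  | cons d t ih =>
    intro st h
    simp only [pvPassA, List.foldl_cons] at h ⊢
    by_cases hc : (PySem.Set.issubset (PySem.Set.ofList d.1) st.1 && !(PySem.Set.contains st.1 d.2)) = true
    · rw [if_pos hc] at h
      obtain ⟨h2, -, -⟩ := ih _ h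
      cases h2
    · rw [if_neg hc] at h ⊢
      obtain ⟨h2, h1, hcl⟩ := ih _ h
      refine ⟨h2, h1, ?_⟩
      intro p hp hsub
      rcases List.mem_cons.1 hp with rfl | hp
      · have hss : PySem.Set.issubset (PySem.Set.ofList p.1) st.1 = true := by
          refine (PySem.Set.issubset_iff _ _).2 ?_
          intro a ha; exact hsub a ((PySem.Set.mem_ofList _ _).1 ha)
        cases hcb : PySem.Set.contains st.1 p.2 with
        | true => exact (PySem.Set.contains_iff _ _).1 hcb
        | false =>
          have hct : (PySem.Set.issubset (PySem.Set.ofList p.1) st.1 && !(PySem.Set.contains st.1 p.2)) = true := by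
            rw [hss, hcb]; rfl
          exact absurd hct hc
      · exact hcl p hp hsub

theorem pvPassA_growth (ds : List (List String × String)) (cl : PySem.Set String)
    (h : (pvPassA ds (cl, false)).2 = true) :
    ∃ r, r ∈ (pvPassA ds (cl, false)).1 ∧ r ∉ cl ∧ r ∈ ds.map Prod.snd := by
  suffices hgen : ∀ (ds : List (List String × String)) (st : PySem.Set String × Bool),
      st.2 = false → (pvPassA ds st).2 = true →
      ∃ r, r ∈ (pvPassA ds st).1 ∧ r ∉ st.1 ∧ r ∈ ds.map Prod.snd by
    exact hgen ds (cl, false) rfl h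
  intro ds
  induction ds with
  | nil => intro st h0 h; rw [show pvPassA [] st = st from rfl] at h; rw [h0] at h; cases h
  | cons d t ih =>
    intro st h0 h
    simp only [pvPassA, List.foldl_cons] at h ⊢
    by_cases hc : (PySem.Set.issubset (PySem.Set.ofList d.1) st.1 && !(PySem.Set.contains st.1 d.2)) = true
    · rw [if_pos hc] at h ⊢
      refine ⟨d.2, ?_, ?_, by simp⟩
      · have hmem : d.2 ∈ (PySem.Set.add st.1 d.2, true).1 :=
          (PySem.Set.mem_add _ _ _).2 (Or.inr rfl)
        simpa [pvPassA] using pvPassA_mono t (PySem.Set.add st.1 d.2, true) d.2 hmem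
      · simp only [Bool.and_eq_true, Bool.not_eq_true'] at hc
        intro hmem
        have := (PySem.Set.contains_iff st.1 d.2).2 hmem
        rw [hc.2] at this; cases this
    · rw [if_neg hc] at h ⊢
      obtain ⟨r, h1, h2, h3⟩ := ih st h0 h
      exact ⟨r, h1, h2, by simp [h3]⟩

-- measure: distinct rhs's not yet in cl
def pvMu (ds : List (List String × String)) (cl : List String) : Nat :=
  ((PySem.Set.ofList (ds.map Prod.snd)).filter (fun r => !(PySem.Set.contains cl r))).length

theorem pvFilterMono {α : Type} (p q : α → Bool) :
    ∀ (l : List α), (∀ x ∈ l, q x = true → p x = true) →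
      (l.filter q).length ≤ (l.filter p).length := by
  intro l
  induction l with
  | nil => simp
  | cons x t ih =>
    intro h
    have ht := ih (fun y hy => h y (List.mem_cons_of_mem _ hy))
    by_cases hq : q x = true
    · have hp := h x List.mem_cons_self hq
      simp only [List.filter_cons, hq, hp, if_pos, List.length_cons]
      omega
    · rw [Bool.not_eq_true] at hq
      by_cases hp : p x = true <;>
        simp [hq, hp] <;> omega

theorem pvFilterLt {α : Type} (p q : α → Bool) :
    ∀ (l : List α), (∀ x ∈ l, q x = true → p x = true) →
      ∀ r ∈ l, p r = true → q r = false →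
      (l.filter q).length < (l.filter p).length := by
  intro l
  induction l with
  | nil => intro _ r hr; cases hr
  | cons x t ih =>
    intro h r hr hp hq
    have hmono := pvFilterMono p q t (fun y hy => h y (List.mem_cons_of_mem _ hy))
    rcases List.mem_cons.1 hr with rfl | hr
    · simp [hp, hq]
      omega
    · have ht := ih (fun y hy => h y (List.mem_cons_of_mem _ hy)) r hr hp hq
      by_cases hqx : q x = true
      · have hpx := h x List.mem_cons_self hqx
        simp only [List.filter_cons, hqx, hpx, if_pos, List.length_cons]
        omega
      · rw [Bool.not_eq_true] at hqx
        by_cases hpx : p x = true <;>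
          simp [hqx, hpx] <;> omega

theorem pvMu_lt (ds : List (List String × String)) (cl cl' : List String)
    (hsub : ∀ x ∈ cl, x ∈ cl') (r : String) (hr1 : r ∈ cl') (hr2 : r ∉ cl)
    (hr3 : r ∈ ds.map Prod.snd) : pvMu ds cl' < pvMu ds cl := by
  unfold pvMu
  refine pvFilterLt _ _ _ ?_ r ((PySem.Set.mem_ofList _ _).2 hr3) ?_ ?_
  · intro x _ hq
    simp only [Bool.not_eq_true'] at hq ⊢
    cases hcb : PySem.Set.contains cl x with
    | false => rfl
    | true =>
      have hx' : x ∈ cl' := hsub x ((PySem.Set.contains_iff _ _).1 hcb)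
      rw [(PySem.Set.contains_iff _ _).2 hx'] at hq
      cases hq
  · simp only [Bool.not_eq_true']
    cases hcb : PySem.Set.contains cl r with
    | false => rfl
    | true => exact absurd ((PySem.Set.contains_iff _ _).1 hcb) hr2
  · rw [(PySem.Set.contains_iff _ _).2 hr1]
    rfl

theorem pvClosA_spec (ds : List (List String × String)) (fuel : Nat) (cl : PySem.Set String)
    (hf : pvMu ds cl < fuel) :
    (∀ x ∈ cl, x ∈ pvClosA ds fuel cl) ∧ pvClosed ds (pvClosA ds fuel cl) ∧
      (∀ D, pvClosed ds D → (∀ x ∈ cl, x ∈ D) → ∀ x ∈ pvClosA ds fuel cl, x ∈ D) := by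
  induction fuel generalizing cl with
  | zero => exact absurd hf (Nat.not_lt_zero _)
  | succ n ih =>
    have hA : pvClosA ds (n+1) cl =
        (if (pvPassA ds (cl, false)).2 = true then pvClosA ds n (pvPassA ds (cl, false)).1
         else (pvPassA ds (cl, false)).1) := rfl
    by_cases hch : (pvPassA ds (cl, false)).2 = true
    · rw [hA, if_pos hch]
      obtain ⟨r, hr1, hr2, hr3⟩ := pvPassA_growth ds cl hch
      have hsub : ∀ x ∈ cl, x ∈ (pvPassA ds (cl, false)).1 :=
        fun x hx => pvPassA_mono ds (cl, false) x hx
      have hmu := pvMu_lt ds cl _ hsub r hr1 hr2 hr3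
      obtain ⟨i1, i2, i3⟩ := ih (pvPassA ds (cl, false)).1 (by omega)
      refine ⟨fun x hx => i1 _ (hsub x hx), i2, ?_⟩
      intro D hD hclD
      exact i3 D hD (pvPassA_sound ds (cl, false) D hD hclD)
    · have hf2 : (pvPassA ds (cl, false)).2 = false := by
        cases hcc : (pvPassA ds (cl, false)).2 with
        | false => rfl
        | true => exact absurd hcc hch
      obtain ⟨heq, hcl⟩ := pvPassA_false ds cl hf2
      rw [hA, if_neg hch, heq]
      exact ⟨fun x hx => hx, hcl, fun D hD h => h⟩


-- ---- B side ----
-- reference form of B's incremental (index, base, rhs_of) state: what one pass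
-- over kept builds
def pvBuild (fds : List (List String × String)) :
    PySem.Dict String (List Int) × List Int × List String :=
  (PySem.List.enumerate fds 0).foldl
    (fun st ip =>
      let s := PySem.Set.ofList ip.2.1
      (s.foldl (fun d x => d.insert x (d.getD x [] ++ [ip.1])) st.1,
       st.2.1 ++ [(s.length : Int)], st.2.2 ++ [ip.2.2]))
    (PySem.Dict.empty, [], [])

-- B's closure of attrs under fds, phrased over the reference state
def pvClosureB (attrs : List String) (fds : List (List String × String)) : PySem.Set String :=
  let b := pvBuild fds
  let cl0 := PySem.Set.ofList attrs
  let st := pvInitB b.2.1 b.2.2 (cl0, cl0)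
  pvLoopB b.1 b.2.2 (attrs.length + fds.length + 1) b.2.1 st.1 st.2

-- the counter value of FD p once the attributes of P have been processed
def pvCnt (P : List String) (p : List String × String) : Int :=
  (((PySem.Set.ofList p.1).filter (fun x => !(PySem.Set.contains P x))).length : Int)

-- what index[a] must be: the positions of the FDs whose lhs set contains a
def pvIdxs (a : String) (fds : List (List String × String)) : List Int :=
  (((List.range fds.length).filter
      (fun k => PySem.Set.contains (PySem.Set.ofList (fds.getD k ([], "")).1) a)).map
    (fun k => ((k : Nat) : Int)))

theorem pvContains_append (P : List String) (a x : String) :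
    PySem.Set.contains (P ++ [a]) x = (PySem.Set.contains P x || x == a) := by
  simp only [pysem]
  have hd : (x == a) = decide (x = a) := by
    cases h : x == a <;> cases h2 : decide (x = a) <;> simp_all
  simp [hd]

theorem pvFilterP_decr (l : List String) (hl : l.Nodup) (P : List String) (a : String)
    (ha : a ∈ l) (haP : a ∉ P) :
    (l.filter (fun x => !(PySem.Set.contains (P ++ [a]) x))).length =
      (l.filter (fun x => !(PySem.Set.contains P x))).length - 1 ∧
    1 ≤ (l.filter (fun x => !(PySem.Set.contains P x))).length := by
  have h1 : l.filter (fun x => !(PySem.Set.contains (P ++ [a]) x)) =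
      (l.filter (fun x => !(PySem.Set.contains P x))).filter (fun x => x != a) := by
    rw [List.filter_filter]
    apply List.filter_congr
    intro x _
    rw [pvContains_append]
    cases h : PySem.Set.contains P x <;> simp [bne]
  have hmem : a ∈ l.filter (fun x => !(PySem.Set.contains P x)) := by
    refine List.mem_filter.2 ⟨ha, ?_⟩
    simp only [Bool.not_eq_true']
    cases h : PySem.Set.contains P a with
    | false => rfl
    | true => exact absurd ((PySem.Set.contains_iff _ _).1 h) haP
  have hnd : (l.filter (fun x => !(PySem.Set.contains P x))).Nodup := hl.filter _
  constructor
  · rw [h1, ← hnd.erase_eq_filter a]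
    exact List.length_erase_of_mem hmem
  · exact List.length_pos_of_mem hmem

theorem pvBuild_snoc (fds : List (List String × String)) (p : List String × String) :
    pvBuild (fds ++ [p]) =
      ((PySem.Set.ofList p.1).foldl
          (fun d x => d.insert x (d.getD x [] ++ [(fds.length : Int)])) (pvBuild fds).1,
       (pvBuild fds).2.1 ++ [((PySem.Set.ofList p.1).length : Int)],
       (pvBuild fds).2.2 ++ [p.2]) := by
  unfold pvBuild
  rw [PySem.List.enumerate_append, List.foldl_append]
  rw [show PySem.List.enumerate [p] ((0 : Int) + (fds.length : Int)) =
      [(((0 : Int) + (fds.length : Int)), p)] from rfl]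
  rw [List.foldl_cons, List.foldl_nil]
  rw [show ((0 : Int) + (fds.length : Int)) = (fds.length : Int) by ring]

theorem pvCnt_nil (p : List String × String) :
    pvCnt [] p = ((PySem.Set.ofList p.1).length : Int) := by
  unfold pvCnt
  norm_num [pysem]

theorem pvCnt_zero_iff (P : List String) (p : List String × String) :
    pvCnt P p = 0 ↔ ∀ x ∈ p.1, x ∈ P := by
  unfold pvCnt
  rw [Nat.cast_eq_zero, List.length_eq_zero_iff, List.filter_eq_nil_iff]
  constructor
  · intro h x hx
    have := h x ((PySem.Set.mem_ofList _ _).2 hx)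
    simp only [Bool.not_eq_true, Bool.not_eq_false'] at this
    exact (PySem.Set.contains_iff _ _).1 this
  · intro h x hx
    simp only [Bool.not_eq_true, Bool.not_eq_false']
    exact (PySem.Set.contains_iff _ _).2 (h x ((PySem.Set.mem_ofList _ _).1 hx))

theorem pvCnt_same (P : List String) (a : String) (p : List String × String)
    (ha : a ∉ p.1) : pvCnt (P ++ [a]) p = pvCnt P p := by
  unfold pvCnt
  congr 2
  apply List.filter_congr
  intro x hx
  rw [pvContains_append]
  have hxa : (x == a) = false := by
    simp only [beq_eq_false_iff_ne, ne_eq]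
    rintro rfl
    exact ha ((PySem.Set.mem_ofList _ _).1 hx)
  rw [hxa, Bool.or_false]

theorem pvCnt_decr (P : List String) (a : String) (p : List String × String)
    (ha : a ∈ p.1) (haP : a ∉ P) : pvCnt (P ++ [a]) p = pvCnt P p - 1 := by
  unfold pvCnt
  obtain ⟨h1, h2⟩ := pvFilterP_decr (PySem.Set.ofList p.1) (PySem.Set.nodup_ofList _)
    P a ((PySem.Set.mem_ofList _ _).2 ha) haP
  rw [h1]
  omega

theorem pvBuild_inner (i : Int) :
    ∀ (S : List String) (d : PySem.Dict String (List Int)), S.Nodup →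
    ∀ a, ((S.foldl (fun d x => d.insert x (d.getD x [] ++ [i])) d).getD a []) =
      d.getD a [] ++ (if a ∈ S then [i] else []) := by
  intro S
  induction S with
  | nil => intro d _ a; simp
  | cons y t ih =>
    intro d hnd a
    rw [List.foldl_cons]
    rw [ih _ (List.nodup_cons.1 hnd).2 a]
    by_cases hay : a = y
    · subst hay
      have hat : a ∉ t := (List.nodup_cons.1 hnd).1
      rw [if_neg hat, PySem.Dict.getD_insert_self]
      simp
    · rw [PySem.Dict.getD_insert_of_ne _ _ _ hay]
      simp [List.mem_cons, hay]

theorem pvBuild_go :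
    ∀ (L : List (List String × String)) (s : Nat) (d : PySem.Dict String (List Int))
      (c : List Int) (r : List String),
    ((PySem.List.enumerate L (s : Int)).foldl
        (fun st ip =>
          let sa := PySem.Set.ofList ip.2.1
          (sa.foldl (fun d x => d.insert x (d.getD x [] ++ [ip.1])) st.1,
           st.2.1 ++ [(sa.length : Int)], st.2.2 ++ [ip.2.2])) (d, c, r)).2.1 =
      c ++ L.map (fun p => ((PySem.Set.ofList p.1).length : Int)) ∧
    ((PySem.List.enumerate L (s : Int)).foldl
        (fun st ip =>
          let sa := PySem.Set.ofList ip.2.1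
          (sa.foldl (fun d x => d.insert x (d.getD x [] ++ [ip.1])) st.1,
           st.2.1 ++ [(sa.length : Int)], st.2.2 ++ [ip.2.2])) (d, c, r)).2.2 =
      r ++ L.map Prod.snd ∧
    ∀ a, (((PySem.List.enumerate L (s : Int)).foldl
        (fun st ip =>
          let sa := PySem.Set.ofList ip.2.1
          (sa.foldl (fun d x => d.insert x (d.getD x [] ++ [ip.1])) st.1,
           st.2.1 ++ [(sa.length : Int)], st.2.2 ++ [ip.2.2])) (d, c, r)).1.getD a []) =
      d.getD a [] ++
        (((List.range L.length).filter
            (fun k => PySem.Set.contains (PySem.Set.ofList (L.getD k ([], "")).1) a)).map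
          (fun k => ((s + k : Nat) : Int))) := by
  intro L
  induction L with
  | nil => intro s d c r; simp [PySem.List.enumerate]
  | cons p t ih =>
    intro s d c r
    rw [PySem.List.enumerate_cons, List.foldl_cons]
    have hcast : ((s : Int) + 1) = ((s + 1 : Nat) : Int) := by push_cast; ring
    rw [hcast]
    obtain ⟨ih1, ih2, ih3⟩ := ih (s + 1) _ (c ++ [((PySem.Set.ofList p.1).length : Int)]) (r ++ [p.2])
    refine ⟨?_, ?_, ?_⟩
    · rw [ih1]; simp
    · rw [ih2]; simp
    · intro a
      rw [ih3 a, pvBuild_inner _ _ _ (PySem.Set.nodup_ofList _) a]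
      have hfil : (List.range (p :: t).length).filter
          (fun k => PySem.Set.contains (PySem.Set.ofList ((p :: t).getD k ([], "")).1) a)
          = (if PySem.Set.contains (PySem.Set.ofList p.1) a = true then [0] else []) ++
            ((List.range t.length).filter
              (fun k => PySem.Set.contains (PySem.Set.ofList (t.getD k ([], "")).1) a)).map
              Nat.succ := by
        rw [show (p :: t).length = t.length + 1 from rfl, List.range_succ_eq_map,
          List.filter_cons, List.filter_map]
        rw [show ((fun k => PySem.Set.contains (PySem.Set.ofList ((p :: t).getD k ([], "")).1) a)
              ∘ Nat.succ)
            = (fun k => PySem.Set.contains (PySem.Set.ofList (t.getD k ([], "")).1) a) from rfl]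
        simp only [List.getD_cons_zero]
        split <;> rfl
      rw [hfil]
      have hfun : ((fun k => ((s + k : Nat) : Int)) ∘ Nat.succ) =
          (fun k => ((s + 1 + k : Nat) : Int)) := by
        funext k
        simp only [Function.comp_apply, Nat.succ_eq_add_one]
        congr 1
        omega
      by_cases hmem : a ∈ PySem.Set.ofList p.1
      · rw [if_pos hmem, if_pos ((PySem.Set.contains_iff _ _).2 hmem)]
        simp only [List.map_append, List.map_cons, List.map_nil, List.map_map,
          List.append_assoc]
        rw [hfun]
        norm_num
      · rw [if_neg hmem, if_neg (fun hc => hmem ((PySem.Set.contains_iff _ _).1 hc))]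
        simp only [List.nil_append, List.map_map, List.append_nil]
        rw [hfun]

theorem pvBuild_spec (fds : List (List String × String)) :
    (pvBuild fds).2.1 = fds.map (fun p => ((PySem.Set.ofList p.1).length : Int)) ∧
    (pvBuild fds).2.2 = fds.map Prod.snd ∧
    ∀ a, ((pvBuild fds).1.getD a []) = pvIdxs a fds := by
  obtain ⟨h1, h2, h3⟩ := pvBuild_go fds 0 PySem.Dict.empty [] []
  refine ⟨by simpa using h1, by simpa using h2, ?_⟩
  intro a
  have h := h3 a
  rw [PySem.Dict.getD_empty] at h
  unfold pvIdxs
  rw [show (pvBuild fds).1 = ((PySem.List.enumerate fds ((0 : Nat) : Int)).foldl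
      (fun st ip =>
        let sa := PySem.Set.ofList ip.2.1
        (sa.foldl (fun d x => d.insert x (d.getD x [] ++ [ip.1])) st.1,
         st.2.1 ++ [(sa.length : Int)], st.2.2 ++ [ip.2.2]))
      (PySem.Dict.empty, [], [])).1 from rfl]
  rw [h, List.nil_append]
  apply List.map_congr_left
  intro k _
  norm_num

theorem pvInit_go (rhs : List String) :
    ∀ (cIn : List Int) (s : Nat) (cl : PySem.Set String) (q : List String), cl.Nodup →
    ∃ new,
      ((PySem.List.enumerate cIn (s : Int)).foldl
          (fun st ic =>
            if ic.2 == 0 && !(PySem.Set.contains st.1 (PySem.List.pyGetD rhs ic.1 "")) then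
              (PySem.Set.add st.1 (PySem.List.pyGetD rhs ic.1 ""),
               st.2 ++ [PySem.List.pyGetD rhs ic.1 ""])
            else st) (cl, q)).1 = cl ++ new ∧
      ((PySem.List.enumerate cIn (s : Int)).foldl
          (fun st ic =>
            if ic.2 == 0 && !(PySem.Set.contains st.1 (PySem.List.pyGetD rhs ic.1 "")) then
              (PySem.Set.add st.1 (PySem.List.pyGetD rhs ic.1 ""),
               st.2 ++ [PySem.List.pyGetD rhs ic.1 ""])
            else st) (cl, q)).2 = q ++ new ∧
      (cl ++ new).Nodup ∧
      (∀ x ∈ new, ∃ j, j < cIn.length ∧ cIn.getD j 0 = 0 ∧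
        x = PySem.List.pyGetD rhs ((s : Int) + (j : Int)) "") ∧
      (∀ j, j < cIn.length → cIn.getD j 0 = 0 →
        PySem.List.pyGetD rhs ((s : Int) + (j : Int)) "" ∈
          ((PySem.List.enumerate cIn (s : Int)).foldl
            (fun st ic =>
              if ic.2 == 0 && !(PySem.Set.contains st.1 (PySem.List.pyGetD rhs ic.1 "")) then
                (PySem.Set.add st.1 (PySem.List.pyGetD rhs ic.1 ""),
                 st.2 ++ [PySem.List.pyGetD rhs ic.1 ""])
              else st) (cl, q)).1) := by
  intro cIn
  induction cIn with
  | nil =>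
    intro s cl q hnd
    refine ⟨[], by simp [PySem.List.enumerate], by simp [PySem.List.enumerate], by simpa, ?_, ?_⟩
    · intro x hx; cases hx
    · intro j hj; cases hj
  | cons c0 t ih =>
    intro s cl q hnd
    rw [PySem.List.enumerate_cons, List.foldl_cons]
    have hcast : ((s : Int) + 1) = ((s + 1 : Nat) : Int) := by push_cast; ring
    by_cases hb : (c0 == 0 && !(PySem.Set.contains cl (PySem.List.pyGetD rhs (s : Int) ""))) = true
    · simp only [Bool.and_eq_true, beq_iff_eq, Bool.not_eq_true'] at hb
      obtain ⟨hc0, hr⟩ := hb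
      have hrn : PySem.List.pyGetD rhs (s : Int) "" ∉ cl := fun hm =>
        by rw [(PySem.Set.contains_iff _ _).2 hm] at hr; cases hr
      rw [if_pos (by simpa [hc0] using hr)]
      rw [PySem.Set.add_of_not_mem hrn]
      have hnd' : (cl ++ [PySem.List.pyGetD rhs (s : Int) ""]).Nodup := by
        refine List.Nodup.append hnd (List.nodup_singleton _) ?_
        intro a ha hb
        rw [List.mem_singleton] at hb
        exact hrn (hb ▸ ha)
      obtain ⟨new', h1, h2, h3, h4, h5⟩ := ih (s + 1) (cl ++ [PySem.List.pyGetD rhs (s : Int) ""])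
        (q ++ [PySem.List.pyGetD rhs (s : Int) ""]) hnd'
      rw [hcast]
      refine ⟨PySem.List.pyGetD rhs (s : Int) "" :: new', by rw [h1]; simp,
        by rw [h2]; simp, by simpa using h3, ?_, ?_⟩
      · intro x hx
        rcases List.mem_cons.1 hx with rfl | hx'
        · exact ⟨0, by simp, by simpa using hc0, by norm_num⟩
        · obtain ⟨j', hj1, hj2, hj3⟩ := h4 x hx'
          refine ⟨j' + 1, by simpa using hj1, by simpa using hj2, ?_⟩
          rw [hj3]
          congr 1
          push_cast; ring
      · intro j hj hj0
        rcases Nat.eq_zero_or_pos j with rfl | hjp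
        · have : PySem.List.pyGetD rhs ((s : Int) + ((0 : Nat) : Int)) "" =
              PySem.List.pyGetD rhs (s : Int) "" := by norm_num
          rw [this, h1]
          exact List.mem_append.2 (Or.inl (List.mem_append.2 (Or.inr (by simp))))
        · obtain ⟨j', rfl⟩ : ∃ j', j = j' + 1 := ⟨j - 1, by omega⟩
          have := h5 j' (by simpa using hj) (by simpa using hj0)
          rw [show ((s : Int) + ((j' + 1 : Nat) : Int)) = (((s+1 : Nat) : Int) + (j' : Nat)) by
            push_cast; ring]
          exact this
    · rw [if_neg hb]
      obtain ⟨new', h1, h2, h3, h4, h5⟩ := ih (s + 1) cl q hnd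
      rw [hcast]
      refine ⟨new', h1, h2, h3, ?_, ?_⟩
      · intro x hx
        obtain ⟨j', hj1, hj2, hj3⟩ := h4 x hx
        refine ⟨j' + 1, by simpa using hj1, by simpa using hj2, ?_⟩
        rw [hj3]; congr 1; push_cast; ring
      · intro j hj hj0
        rcases Nat.eq_zero_or_pos j with rfl | hjp
        · simp only [List.getD_cons_zero] at hj0
          have hcl : PySem.List.pyGetD rhs (s : Int) "" ∈ cl := by
            by_contra hrn
            have hr : PySem.Set.contains cl (PySem.List.pyGetD rhs (s : Int) "") = false := by
              cases hcc : PySem.Set.contains cl (PySem.List.pyGetD rhs (s : Int) "") with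
              | false => rfl
              | true => exact absurd ((PySem.Set.contains_iff _ _).1 hcc) hrn
            exact hb (by rw [hj0, hr]; rfl)
          have : PySem.List.pyGetD rhs ((s : Int) + ((0 : Nat) : Int)) "" =
              PySem.List.pyGetD rhs (s : Int) "" := by norm_num
          rw [this, h1]
          exact List.mem_append.2 (Or.inl hcl)
        · obtain ⟨j', rfl⟩ : ∃ j', j = j' + 1 := ⟨j - 1, by omega⟩
          have := h5 j' (by simpa using hj) (by simpa using hj0)
          rw [show ((s : Int) + ((j' + 1 : Nat) : Int)) = (((s+1 : Nat) : Int) + (j' : Nat)) by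
            push_cast; ring]
          exact this

theorem pvStepB_eq (rhs : List String) (count : List Int) (cl : PySem.Set String)
    (q : List String) (i : Int) :
    pvStepB rhs (count, cl, q) i =
      (if PySem.List.pyGetD count i 0 - 1 = 0 then
        (if PySem.List.pyGetD rhs i "" ∈ cl then
          (PySem.List.pySetD count i (PySem.List.pyGetD count i 0 - 1), cl, q)
         else
          (PySem.List.pySetD count i (PySem.List.pyGetD count i 0 - 1),
           cl ++ [PySem.List.pyGetD rhs i ""], q ++ [PySem.List.pyGetD rhs i ""]))
       else (PySem.List.pySetD count i (PySem.List.pyGetD count i 0 - 1), cl, q)) := by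
  unfold pvStepB
  dsimp only
  by_cases h : PySem.List.pyGetD count i 0 - 1 = 0
  · rw [if_pos (by simpa using h), if_pos h]
    by_cases h2 : PySem.List.pyGetD rhs i "" ∈ cl
    · rw [if_pos h2, (PySem.Set.contains_iff _ _).2 h2]
      rfl
    · have hcf : PySem.Set.contains cl (PySem.List.pyGetD rhs i "") = false := by
        cases hcc : PySem.Set.contains cl (PySem.List.pyGetD rhs i "") with
        | false => rfl
        | true => exact absurd ((PySem.Set.contains_iff _ _).1 hcc) h2
      rw [if_neg h2, hcf, PySem.Set.add_of_not_mem h2]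
      rfl
  · rw [if_neg (by simpa using h), if_neg h]

theorem pvPop_go (fds : List (List String × String)) (a : String) (P : List String)
    (haP : a ∉ P) :
    ∀ (K : List Nat) (count : List Int) (cl : PySem.Set String) (q : List String),
    K.Nodup →
    (∀ k ∈ K, k < fds.length ∧ a ∈ (fds.getD k ([], "")).1) →
    count.length = fds.length →
    (∀ j, j < fds.length → count.getD j 0 =
        (if j ∈ K then pvCnt P (fds.getD j ([], "")) else pvCnt (P ++ [a]) (fds.getD j ([], "")))) →
    (∀ j, j < fds.length → count.getD j 0 = 0 → (fds.getD j ([], "")).2 ∈ cl) →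
    cl.Nodup → (∀ x ∈ P, x ∈ cl) → a ∈ cl →
    ∃ new,
      ((K.map (fun k => ((k : Nat) : Int))).foldl (pvStepB (fds.map Prod.snd)) (count, cl, q)) =
        (((K.map (fun k => ((k : Nat) : Int))).foldl (pvStepB (fds.map Prod.snd)) (count, cl, q)).1,
          cl ++ new, q ++ new) ∧
      ((K.map (fun k => ((k : Nat) : Int))).foldl (pvStepB (fds.map Prod.snd)) (count, cl, q)).1.length = fds.length ∧
      (∀ j, j < fds.length →
        ((K.map (fun k => ((k : Nat) : Int))).foldl (pvStepB (fds.map Prod.snd)) (count, cl, q)).1.getD j 0 =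
          pvCnt (P ++ [a]) (fds.getD j ([], ""))) ∧
      (cl ++ new).Nodup ∧
      (∀ x ∈ new, x ∈ fds.map Prod.snd) ∧
      (∀ j, j < fds.length →
        ((K.map (fun k => ((k : Nat) : Int))).foldl (pvStepB (fds.map Prod.snd)) (count, cl, q)).1.getD j 0 = 0 →
        (fds.getD j ([], "")).2 ∈ cl ++ new) ∧
      (∀ D, pvClosed fds D → (∀ x ∈ cl, x ∈ D) → ∀ x ∈ cl ++ new, x ∈ D) := by
  intro K
  induction K with
  | nil =>
    intro count cl q _ hKmem hlen hcount hzero hnd hPcl hacl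
    simp only [List.map_nil, List.foldl_nil]
    refine ⟨[], by simp, by simpa using hlen, ?_, by simpa using hnd, by simp, ?_, ?_⟩
    · intro j hj
      rw [hcount j hj, if_neg (List.not_mem_nil)]
    · intro j hj h0
      rw [List.append_nil]
      exact hzero j hj h0
    · intro D _ hclD x hx
      rw [List.append_nil] at hx
      exact hclD x hx
  | cons k K' ih =>
    intro count cl q hKnd hKmem hlen hcount hzero hnd hPcl hacl
    obtain ⟨hk, hak⟩ := hKmem k List.mem_cons_self
    have hkK' : k ∉ K' := (List.nodup_cons.1 hKnd).1
    have hklen : k < count.length := hlen ▸ hk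
    have hmemfd : fds.getD k ([], "") ∈ fds := by
      rw [List.getD_eq_getElem _ _ hk]
      exact List.getElem_mem hk
    have hcval : PySem.List.pyGetD count ((k : Nat) : Int) 0 = pvCnt P (fds.getD k ([], "")) := by
      rw [PySem.List.pyGetD_natCast, hcount k hk, if_pos List.mem_cons_self]
    have hcd : pvCnt P (fds.getD k ([], "")) - 1 = pvCnt (P ++ [a]) (fds.getD k ([], "")) :=
      (pvCnt_decr P a _ hak haP).symm
    have hrval : PySem.List.pyGetD (fds.map Prod.snd) ((k : Nat) : Int) "" =
        (fds.getD k ([], "")).2 := by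
      rw [PySem.List.pyGetD_natCast]
      simp [List.getD, hk]
    have hsetval : PySem.List.pySetD count ((k : Nat) : Int)
        (pvCnt (P ++ [a]) (fds.getD k ([], ""))) =
        count.set k (pvCnt (P ++ [a]) (fds.getD k ([], ""))) :=
      PySem.List.pySetD_natCast _ _ _
    have hgetset : (count.set k (pvCnt (P ++ [a]) (fds.getD k ([], "")))).getD k 0 =
        pvCnt (P ++ [a]) (fds.getD k ([], "")) := by
      simp [List.getD, hklen]
    have hgetne : ∀ j, j ≠ k →
        (count.set k (pvCnt (P ++ [a]) (fds.getD k ([], "")))).getD j 0 = count.getD j 0 := by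
      intro j hjk
      simp [List.getD, List.getElem?_set_ne (Ne.symm hjk)]
    have hcount1 : ∀ j, j < fds.length →
        (count.set k (pvCnt (P ++ [a]) (fds.getD k ([], "")))).getD j 0 =
          (if j ∈ K' then pvCnt P (fds.getD j ([], "")) else pvCnt (P ++ [a]) (fds.getD j ([], ""))) := by
      intro j hj
      by_cases hjk : j = k
      · subst hjk
        rw [if_neg hkK', hgetset]
      · rw [hgetne j hjk, hcount j hj]
        by_cases hjK : j ∈ K'
        · rw [if_pos (List.mem_cons_of_mem _ hjK), if_pos hjK]
        · rw [if_neg hjK, if_neg (fun hm => by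
            rcases List.mem_cons.1 hm with h | h
            · exact hjk h
            · exact hjK h)]
    rw [List.map_cons, List.foldl_cons, pvStepB_eq, hcval, hcd, hsetval, hrval]
    by_cases hc0 : pvCnt (P ++ [a]) (fds.getD k ([], "")) = 0
    · rw [if_pos hc0]
      by_cases hrcl : (fds.getD k ([], "")).2 ∈ cl
      · rw [if_pos hrcl]
        obtain ⟨new', r1, r2, r3, r4, r5, r6, r7⟩ := ih _ cl q (List.nodup_cons.1 hKnd).2
          (fun k' hk' => hKmem k' (List.mem_cons_of_mem _ hk'))
          (by simpa using hlen) hcount1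
          (fun j hj h0 => by
            rcases eq_or_ne j k with rfl | hjk
            · exact hrcl
            · exact hzero j hj (by rw [← hgetne j hjk]; exact h0))
          hnd hPcl hacl
        exact ⟨new', r1, r2, r3, r4, r5, r6, r7⟩
      · rw [if_neg hrcl]
        have hnd1 : (cl ++ [(fds.getD k ([], "")).2]).Nodup := by
          refine List.Nodup.append hnd (List.nodup_singleton _) ?_
          intro x hx hx2
          rw [List.mem_singleton] at hx2
          exact hrcl (hx2 ▸ hx)
        obtain ⟨new', r1, r2, r3, r4, r5, r6, r7⟩ := ih _ (cl ++ [(fds.getD k ([], "")).2])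
          (q ++ [(fds.getD k ([], "")).2]) (List.nodup_cons.1 hKnd).2
          (fun k' hk' => hKmem k' (List.mem_cons_of_mem _ hk'))
          (by simpa using hlen) hcount1
          (fun j hj h0 => by
            rcases eq_or_ne j k with rfl | hjk
            · exact List.mem_append.2 (Or.inr (by simp))
            · exact List.mem_append.2 (Or.inl (hzero j hj (by rw [← hgetne j hjk]; exact h0))))
          hnd1 (fun x hx => List.mem_append.2 (Or.inl (hPcl x hx)))
          (List.mem_append.2 (Or.inl hacl))
        refine ⟨(fds.getD k ([], "")).2 :: new', ?_, r2, r3, ?_, ?_, ?_, ?_⟩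
        · rw [r1]
          simp [List.append_assoc]
        · simpa [List.append_assoc] using r4
        · intro x hx
          rcases List.mem_cons.1 hx with rfl | hx'
          · exact List.mem_map.2 ⟨fds.getD k ([], ""), hmemfd, rfl⟩
          · exact r5 x hx'
        · intro j hj h0
          simpa [List.append_assoc] using r6 j hj h0
        · intro D hD hclD
          have hlhsD : ∀ x ∈ (fds.getD k ([], "")).1, x ∈ D := by
            intro x hx
            rcases List.mem_append.1 ((pvCnt_zero_iff _ _).1 hc0 x hx) with h | h
            · exact hclD _ (hPcl x h)
            · rw [List.mem_singleton] at h
              exact hclD _ (h ▸ hacl)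
          have hrD : (fds.getD k ([], "")).2 ∈ D := hD _ hmemfd hlhsD
          have hcl1D : ∀ y ∈ cl ++ [(fds.getD k ([], "")).2], y ∈ D := by
            intro y hy
            rcases List.mem_append.1 hy with h | h
            · exact hclD y h
            · rw [List.mem_singleton] at h
              exact h ▸ hrD
          intro x hx
          exact r7 D hD hcl1D x (by simpa [List.append_assoc] using hx)
    · rw [if_neg hc0]
      obtain ⟨new', r1, r2, r3, r4, r5, r6, r7⟩ := ih _ cl q (List.nodup_cons.1 hKnd).2
        (fun k' hk' => hKmem k' (List.mem_cons_of_mem _ hk'))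
        (by simpa using hlen) hcount1
        (fun j hj h0 => by
          rcases eq_or_ne j k with rfl | hjk
          · exact absurd (hgetset ▸ h0) hc0
          · exact hzero j hj (by rw [← hgetne j hjk]; exact h0))
        hnd hPcl hacl
      exact ⟨new', r1, r2, r3, r4, r5, r6, r7⟩

theorem pvLoopB_spec (fds : List (List String × String)) (U : List String)
    (hU : U.Nodup) (hUr : ∀ r ∈ fds.map Prod.snd, r ∈ U) :
    ∀ (n : Nat) (P : List String) (cl : PySem.Set String) (queue : List String),
    (U.filter (fun x => !(PySem.Set.contains P x))).length < n →
    cl.Nodup → cl.Perm (P ++ queue) → (∀ x ∈ cl, x ∈ U) →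
    (∀ p ∈ fds, (∀ x ∈ p.1, x ∈ P) → p.2 ∈ cl) →
    (∀ x ∈ cl, x ∈ pvLoopB (pvBuild fds).1 (fds.map Prod.snd) n (fds.map (pvCnt P)) cl queue) ∧
    pvClosed fds (pvLoopB (pvBuild fds).1 (fds.map Prod.snd) n (fds.map (pvCnt P)) cl queue) ∧
    (∀ D, pvClosed fds D → (∀ x ∈ cl, x ∈ D) →
      ∀ x ∈ pvLoopB (pvBuild fds).1 (fds.map Prod.snd) n (fds.map (pvCnt P)) cl queue, x ∈ D) := by
  intro n
  induction n with
  | zero =>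
    intro P cl queue hf
    exact absurd hf (by omega)
  | succ n ih =>
    intro P cl queue hf hnd hperm hclU hI3
    rcases queue with _ | ⟨x, rest⟩
    · -- queue exhausted: the closure is complete
      rw [show pvLoopB (pvBuild fds).1 (fds.map Prod.snd) (n+1) (fds.map (pvCnt P)) cl [] = cl
        from rfl]
      have hclP : ∀ y ∈ cl, y ∈ P := by
        intro y hy
        have := hperm.mem_iff.1 hy
        simpa using this
      refine ⟨fun x hx => hx, ?_, fun D _ h => h⟩
      intro p hp hsub
      exact hI3 p hp (fun x hx => hclP x (hsub x hx))
    · -- pop the last element a of the queue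
      set a := (x :: rest).getLast (List.cons_ne_nil x rest) with ha_def
      set q0 := (x :: rest).dropLast with hq0_def
      have hq : q0 ++ [a] = x :: rest := List.dropLast_append_getLast _
      rw [show pvLoopB (pvBuild fds).1 (fds.map Prod.snd) (n+1) (fds.map (pvCnt P)) cl (x :: rest) =
          pvLoopB (pvBuild fds).1 (fds.map Prod.snd) n
            (((pvBuild fds).1.getD a []).foldl (pvStepB (fds.map Prod.snd))
              (fds.map (pvCnt P), cl, q0)).1
            (((pvBuild fds).1.getD a []).foldl (pvStepB (fds.map Prod.snd))
              (fds.map (pvCnt P), cl, q0)).2.1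
            (((pvBuild fds).1.getD a []).foldl (pvStepB (fds.map Prod.snd))
              (fds.map (pvCnt P), cl, q0)).2.2 from rfl]
      rw [← hq] at hperm
      have hpm : cl.Perm (P ++ q0 ++ [a]) := by
        refine hperm.trans ?_
        rw [List.append_assoc]
      have hndP : (P ++ q0 ++ [a]).Nodup := hpm.nodup hnd
      have haP : a ∉ P := by
        intro hmem
        have hd := List.disjoint_of_nodup_append hndP
        exact hd (List.mem_append.2 (Or.inl hmem)) (List.mem_singleton_self a)
      have hacl : a ∈ cl := hpm.mem_iff.2 (by simp)
      have hPcl : ∀ y ∈ P, y ∈ cl := fun y hy => hpm.mem_iff.2 (by simp [hy])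
      have haU : a ∈ U := hclU a hacl
      -- the index list for a
      have hidx : (pvBuild fds).1.getD a [] =
          (((List.range fds.length).filter
              (fun k => PySem.Set.contains (PySem.Set.ofList (fds.getD k ([], "")).1) a)).map
            (fun k => ((k : Nat) : Int))) := (pvBuild_spec fds).2.2 a
      set K := ((List.range fds.length).filter
          (fun k => PySem.Set.contains (PySem.Set.ofList (fds.getD k ([], "")).1) a)) with hK_def
      have hKnd : K.Nodup := (List.nodup_range).filter _
      have hKmem : ∀ k ∈ K, k < fds.length ∧ a ∈ (fds.getD k ([], "")).1 := by
        intro k hk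
        have h1 := List.mem_range.1 (List.mem_of_mem_filter hk)
        have h2 := List.of_mem_filter hk
        exact ⟨h1, (PySem.Set.mem_ofList _ _).1 ((PySem.Set.contains_iff _ _).1 h2)⟩
      have hmapget : ∀ (Q : List String) j, j < fds.length →
          (fds.map (pvCnt Q)).getD j 0 = pvCnt Q (fds.getD j ([], "")) := by
        intro Q j hj
        simp [List.getD, hj]
      have hcount0 : ∀ j, j < fds.length → (fds.map (pvCnt P)).getD j 0 =
          (if j ∈ K then pvCnt P (fds.getD j ([], "")) else pvCnt (P ++ [a]) (fds.getD j ([], ""))) := by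
        intro j hj
        rw [hmapget P j hj]
        by_cases hjK : j ∈ K
        · rw [if_pos hjK]
        · rw [if_neg hjK]
          have hanotin : a ∉ (fds.getD j ([], "")).1 := by
            intro hmem
            exact hjK (List.mem_filter.2 ⟨List.mem_range.2 hj,
              (PySem.Set.contains_iff _ _).2 ((PySem.Set.mem_ofList _ _).2 hmem)⟩)
          rw [pvCnt_same P a _ hanotin]
      have hzero0 : ∀ j, j < fds.length → (fds.map (pvCnt P)).getD j 0 = 0 →
          (fds.getD j ([], "")).2 ∈ cl := by
        intro j hj h0
        rw [hmapget P j hj] at h0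
        have hmemfd : fds.getD j ([], "") ∈ fds := by
          rw [List.getD_eq_getElem _ _ hj]
          exact List.getElem_mem hj
        exact hI3 _ hmemfd ((pvCnt_zero_iff _ _).1 h0)
      rw [hidx]
      obtain ⟨new, r1, r2, r3, r4, r5, r6, r7⟩ := pvPop_go fds a P haP K
        (fds.map (pvCnt P)) cl q0 hKnd hKmem (by simp) hcount0 hzero0 hnd hPcl hacl
      have hcnt' : ((K.map (fun k => ((k : Nat) : Int))).foldl (pvStepB (fds.map Prod.snd))
          (fds.map (pvCnt P), cl, q0)).1 = fds.map (pvCnt (P ++ [a])) := by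
        apply List.ext_getElem
        · rw [r2]; simp
        · intro i h1 h2
          have hi : i < fds.length := by rw [r2] at h1; exact h1
          have := r3 i hi
          rw [List.getD_eq_getElem _ _ h1] at this
          rw [this]
          simp [hi]
      have hfold : ((K.map (fun k => ((k : Nat) : Int))).foldl (pvStepB (fds.map Prod.snd))
          (fds.map (pvCnt P), cl, q0)) = (fds.map (pvCnt (P ++ [a])), cl ++ new, q0 ++ new) := by
        rw [r1, hcnt']
      rw [hfold]
      -- measure decreases
      obtain ⟨hm1, hm2⟩ := pvFilterP_decr U hU P a haU haP
      -- invariants for the recursive call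
      have hperm' : (cl ++ new).Perm ((P ++ [a]) ++ (q0 ++ new)) := by
        have h1 : (cl ++ new).Perm ((P ++ q0 ++ [a]) ++ new) := hpm.append_right new
        refine h1.trans ?_
        have h2 : ((P ++ q0 ++ [a]) ++ new).Perm ((P ++ ([a] ++ q0)) ++ new) := by
          refine List.Perm.append_right new ?_
          rw [List.append_assoc]
          exact List.Perm.append_left P (List.perm_append_comm)
        refine h2.trans ?_
        simp [List.append_assoc]
      have hclU' : ∀ y ∈ cl ++ new, y ∈ U := by
        intro y hy
        rcases List.mem_append.1 hy with h | h
        · exact hclU y h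
        · exact hUr y (r5 y h)
      have hI3' : ∀ p ∈ fds, (∀ x ∈ p.1, x ∈ P ++ [a]) → p.2 ∈ cl ++ new := by
        intro p hp hsub
        obtain ⟨j, hj, hpe⟩ := List.mem_iff_getElem.1 hp
        have hgd : fds.getD j ([], "") = p := by
          rw [List.getD_eq_getElem _ _ hj, hpe]
        have hc0 : pvCnt (P ++ [a]) (fds.getD j ([], "")) = 0 := by
          rw [hgd]
          exact (pvCnt_zero_iff _ _).2 hsub
        have := r6 j hj (by rw [r3 j hj]; exact hc0)
        rw [hgd] at this
        exact this
      obtain ⟨i1, i2, i3⟩ := ih (P ++ [a]) (cl ++ new) (q0 ++ new) (by omega)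
        r4 hperm' hclU' hI3'
      refine ⟨?_, i2, ?_⟩
      · intro y hy
        exact i1 y (List.mem_append.2 (Or.inl hy))
      · intro D hD hclD
        exact fun y hy => i3 D hD (r7 D hD hclD) y hy

theorem pvClosureB_spec (attrs : List String) (fds : List (List String × String)) :
    (∀ x ∈ PySem.Set.ofList attrs, x ∈ pvClosureB attrs fds) ∧
    pvClosed fds (pvClosureB attrs fds) ∧
    (∀ D, pvClosed fds D → (∀ x ∈ PySem.Set.ofList attrs, x ∈ D) →
      ∀ x ∈ pvClosureB attrs fds, x ∈ D) := by
  obtain ⟨hb1, hb2, hb3⟩ := pvBuild_spec fds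
  have hshow : pvClosureB attrs fds =
      pvLoopB (pvBuild fds).1 (pvBuild fds).2.2 (attrs.length + fds.length + 1)
        (pvBuild fds).2.1
        (pvInitB (pvBuild fds).2.1 (pvBuild fds).2.2 (PySem.Set.ofList attrs, PySem.Set.ofList attrs)).1
        (pvInitB (pvBuild fds).2.1 (pvBuild fds).2.2 (PySem.Set.ofList attrs, PySem.Set.ofList attrs)).2 := rfl
  have hinit : pvInitB (pvBuild fds).2.1 (pvBuild fds).2.2
      (PySem.Set.ofList attrs, PySem.Set.ofList attrs) =
      ((PySem.List.enumerate (fds.map (fun p => ((PySem.Set.ofList p.1).length : Int)))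
          (((0 : Nat) : Int))).foldl
        (fun st ic =>
          if ic.2 == 0 && !(PySem.Set.contains st.1 (PySem.List.pyGetD (fds.map Prod.snd) ic.1 "")) then
            (PySem.Set.add st.1 (PySem.List.pyGetD (fds.map Prod.snd) ic.1 ""),
             st.2 ++ [PySem.List.pyGetD (fds.map Prod.snd) ic.1 ""])
          else st) (PySem.Set.ofList attrs, PySem.Set.ofList attrs)) := by
    rw [show pvInitB (pvBuild fds).2.1 (pvBuild fds).2.2
        (PySem.Set.ofList attrs, PySem.Set.ofList attrs) =
        ((PySem.List.enumerate (pvBuild fds).2.1 (((0 : Nat) : Int))).foldl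
          (fun st ic =>
            if ic.2 == 0 && !(PySem.Set.contains st.1 (PySem.List.pyGetD (pvBuild fds).2.2 ic.1 "")) then
              (PySem.Set.add st.1 (PySem.List.pyGetD (pvBuild fds).2.2 ic.1 ""),
               st.2 ++ [PySem.List.pyGetD (pvBuild fds).2.2 ic.1 ""])
            else st) (PySem.Set.ofList attrs, PySem.Set.ofList attrs)) from rfl, hb1, hb2]
  obtain ⟨new, h1, h2, h3, h4, h5⟩ := pvInit_go (fds.map Prod.snd)
    (fds.map (fun p => ((PySem.Set.ofList p.1).length : Int))) 0
    (PySem.Set.ofList attrs) (PySem.Set.ofList attrs) (PySem.Set.nodup_ofList _)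
  rw [← hinit] at h1 h2 h5
  have hnewr : ∀ x ∈ new, x ∈ fds.map Prod.snd := by
    intro x hx
    obtain ⟨j, hj, _, hx2⟩ := h4 x hx
    have hjn : j < fds.length := by simpa using hj
    rw [hx2]
    rw [show (((0 : Nat) : Int) + (j : Int)) = ((j : Nat) : Int) by norm_num,
      PySem.List.pyGetD_natCast]
    rw [List.getD_eq_getElem _ _ (by simpa using hjn : j < (fds.map Prod.snd).length)]
    exact List.getElem_mem _
  have hcnt0 : (pvBuild fds).2.1 = fds.map (pvCnt []) := by
    rw [hb1]
    exact List.map_congr_left (fun p _ => (pvCnt_nil p).symm)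
  -- the universe of attributes for the fuel bound
  obtain ⟨l1, l2, l3⟩ := pvLoopB_spec fds (PySem.Set.ofList (attrs ++ fds.map Prod.snd))
    (PySem.Set.nodup_ofList _)
    (fun r hr => (PySem.Set.mem_ofList _ _).2 (List.mem_append.2 (Or.inr hr)))
    (attrs.length + fds.length + 1) [] ((PySem.Set.ofList attrs) ++ new)
    ((PySem.Set.ofList attrs) ++ new)
    (by
      have hfeq : (PySem.Set.ofList (attrs ++ fds.map Prod.snd)).filter
          (fun x => !(PySem.Set.contains ([] : List String) x)) =
          PySem.Set.ofList (attrs ++ fds.map Prod.snd) :=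
        List.filter_eq_self.2 (fun x _ => rfl)
      rw [hfeq]
      have := PySem.Set.length_ofList_le (attrs ++ fds.map Prod.snd)
      rw [List.length_append, List.length_map] at this
      omega)
    h3 (by simp) 
    (by
      intro y hy
      rcases List.mem_append.1 hy with h | h
      · exact (PySem.Set.mem_ofList _ _).2 (List.mem_append.2
          (Or.inl ((PySem.Set.mem_ofList _ _).1 h)))
      · exact (PySem.Set.mem_ofList _ _).2 (List.mem_append.2 (Or.inr (hnewr y h))))
    (by
      intro p hp hsub
      obtain ⟨j, hj, hpe⟩ := List.mem_iff_getElem.1 hp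
      have hgd : fds.getD j ([], "") = p := by
        rw [List.getD_eq_getElem _ _ hj, hpe]
      have hc0 : pvCnt ([] : List String) p = 0 := (pvCnt_zero_iff _ _).2 hsub
      have hlen0 : ((PySem.Set.ofList p.1).length : Int) = 0 := by
        rw [← pvCnt_nil p]
        exact hc0
      have hjm : j < (fds.map (fun p => ((PySem.Set.ofList p.1).length : Int))).length := by
        simpa using hj
      have hget : (fds.map (fun p => ((PySem.Set.ofList p.1).length : Int))).getD j 0 = 0 := by
        rw [List.getD_eq_getElem _ _ hjm]
        simp only [List.getElem_map]
        rw [show fds[j] = p from hpe]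
        exact hlen0
      have := h5 j hjm hget
      rw [h1] at this
      rw [show (((0 : Nat) : Int) + (j : Int)) = ((j : Nat) : Int) by norm_num,
        PySem.List.pyGetD_natCast] at this
      have hrg : (fds.map Prod.snd).getD j "" = p.2 := by
        rw [List.getD_eq_getElem _ _ (by simpa using hj)]
        simp only [List.getElem_map]
        rw [show fds[j] = p from hpe]
      rw [hrg] at this
      exact this)
  rw [hshow, h1, h2, hb2, hcnt0]
  refine ⟨?_, l2, ?_⟩
  · intro x hx
    exact l1 x (List.mem_append.2 (Or.inl hx))
  · intro D hD hattrD
    refine fun x hx => l3 D hD ?_ x hx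
    intro y hy
    rcases List.mem_append.1 hy with h | h
    · exact hattrD y h
    · obtain ⟨j, hj, hj0, hy2⟩ := h4 y h
      have hjn : j < fds.length := by simpa using hj
      have hgd0 : (fds.map (fun p => ((PySem.Set.ofList p.1).length : Int))).getD j 0 =
          ((PySem.Set.ofList (fds.getD j ([], "")).1).length : Int) := by
        rw [List.getD_eq_getElem _ _ hj]
        simp [List.getD, hjn]
      have hcnt_j : pvCnt ([] : List String) (fds.getD j ([], "")) = 0 := by
        rw [pvCnt_nil]
        rw [hgd0] at hj0
        exact hj0
      have hlhs : ∀ x ∈ (fds.getD j ([], "")).1, x ∈ D :=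
        fun x hx => absurd ((pvCnt_zero_iff _ _).1 hcnt_j x hx) (List.not_mem_nil)
      have hmemfd : fds.getD j ([], "") ∈ fds := by
        rw [List.getD_eq_getElem _ _ hjn]
        exact List.getElem_mem hjn
      have hyval : y = (fds.getD j ([], "")).2 := by
        rw [hy2, show (((0 : Nat) : Int) + (j : Int)) = ((j : Nat) : Int) by norm_num,
          PySem.List.pyGetD_natCast, List.getD_eq_getElem _ _ (by simpa using hjn)]
        simp [List.getD, hjn]
      rw [hyval]
      exact hD _ hmemfd hlhs

-- ---- the two closures agree membership-wise ----
theorem pvClos_agree (ds : List (List String × String)) (s : List String) (r : String) :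
    PySem.Set.contains (pvClosA ds (ds.length + 1) (PySem.Set.ofList s)) r =
      PySem.Set.contains (pvClosureB s ds) r := by
  have hmub : pvMu ds (PySem.Set.ofList s) < ds.length + 1 := by
    have h1 : pvMu ds (PySem.Set.ofList s) ≤ (PySem.Set.ofList (ds.map Prod.snd)).length :=
      List.length_filter_le _ _
    have h2 := PySem.Set.length_ofList_le (ds.map Prod.snd)
    rw [List.length_map] at h2
    omega
  obtain ⟨a1, a2, a3⟩ := pvClosA_spec ds (ds.length + 1) (PySem.Set.ofList s) hmub
  obtain ⟨b1, b2, b3⟩ := pvClosureB_spec s ds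
  have hiff : r ∈ pvClosA ds (ds.length + 1) (PySem.Set.ofList s) ↔ r ∈ pvClosureB s ds :=
    ⟨fun h => a3 _ b2 b1 r h, fun h => b3 _ a2 a1 r h⟩
  cases hA' : PySem.Set.contains (pvClosA ds (ds.length + 1) (PySem.Set.ofList s)) r with
  | true =>
    exact ((PySem.Set.contains_iff _ _).2 (hiff.1 ((PySem.Set.contains_iff _ _).1 hA'))).symm
  | false =>
    cases hB' : PySem.Set.contains (pvClosureB s ds) r with
    | false => rfl
    | true =>
      have hm := hiff.2 ((PySem.Set.contains_iff _ _).1 hB')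
      rw [(PySem.Set.contains_iff _ _).2 hm] at hA'
      cases hA'

-- ===== VERDICT (by name: the statement is the Claim_ definition above) =====
theorem filter_redundant_dependencies_spec : Claim_equal_filter_redundant_dependencies := by
  intro deps _
  unfold Spec_filter_redundant_dependencies
  unfold filter_redundant_dependencies filter_redundant_dependencies_alt
  suffices hgen : ∀ (L acc : List (List String × String)),
      (L.foldl
        (fun st fd =>
          let cl0 := PySem.Set.ofList fd.1
          let init := pvInitB st.2.2.1 st.2.2.2 (cl0, cl0)
          let cl := pvLoopB st.2.1 st.2.2.2 (fd.1.length + st.1.length + 1) st.2.2.1 init.1 init.2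
          if PySem.Set.contains cl fd.2 then st
          else
            let s := PySem.Set.ofList fd.1
            (st.1 ++ [fd],
             s.foldl (fun d x => d.insert x (d.getD x [] ++ [(st.1.length : Int)])) st.2.1,
             st.2.2.1 ++ [(s.length : Int)], st.2.2.2 ++ [fd.2]))
        (acc, pvBuild acc)).1 =
      L.foldl (fun acc fd => if pvIsRedundant fd acc then acc else acc ++ [fd]) acc by
    exact ((hgen (PySem.List.sorted2 deps (fun x => x.1.length) (fun x => x.2)) []).symm).trans rfl
  intro L
  induction L with
  | nil => intro acc; rfl
  | cons fd t ih =>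
    intro acc
    rw [List.foldl_cons, List.foldl_cons]
    have key : (if PySem.Set.contains (pvClosureB fd.1 acc) fd.2 then
          ((acc, pvBuild acc) :
            List (List String × String) × PySem.Dict String (List Int) × List Int × List String)
        else
          (acc ++ [fd],
           (PySem.Set.ofList fd.1).foldl
             (fun d x => d.insert x (d.getD x [] ++ [(acc.length : Int)])) (pvBuild acc).1,
           (pvBuild acc).2.1 ++ [((PySem.Set.ofList fd.1).length : Int)],
           (pvBuild acc).2.2 ++ [fd.2])) =
        ((if pvIsRedundant fd acc then acc else acc ++ [fd]),
         pvBuild (if pvIsRedundant fd acc then acc else acc ++ [fd])) := by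
      rw [show PySem.Set.contains (pvClosureB fd.1 acc) fd.2 = pvIsRedundant fd acc from
        (pvClos_agree acc fd.1 fd.2).symm]
      by_cases h : pvIsRedundant fd acc = true
      · simp only [h, if_true]
      · have h' : pvIsRedundant fd acc = false := by
          revert h
          cases pvIsRedundant fd acc <;> simp
        simp only [h', Bool.false_eq_true, if_false]
        rw [pvBuild_snoc]
    show (t.foldl
        (fun st fd =>
          let cl0 := PySem.Set.ofList fd.1
          let init := pvInitB st.2.2.1 st.2.2.2 (cl0, cl0)
          let cl := pvLoopB st.2.1 st.2.2.2 (fd.1.length + st.1.length + 1) st.2.2.1 init.1 init.2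
          if PySem.Set.contains cl fd.2 then st
          else
            let s := PySem.Set.ofList fd.1
            (st.1 ++ [fd],
             s.foldl (fun d x => d.insert x (d.getD x [] ++ [(st.1.length : Int)])) st.2.1,
             st.2.2.1 ++ [(s.length : Int)], st.2.2.2 ++ [fd.2]))
        (if PySem.Set.contains (pvClosureB fd.1 acc) fd.2 then
          (acc, pvBuild acc)
        else
          (acc ++ [fd],
           (PySem.Set.ofList fd.1).foldl
             (fun d x => d.insert x (d.getD x [] ++ [(acc.length : Int)])) (pvBuild acc).1,
           (pvBuild acc).2.1 ++ [((PySem.Set.ofList fd.1).length : Int)],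
           (pvBuild acc).2.2 ++ [fd.2]))).1 =
      t.foldl (fun acc fd => if pvIsRedundant fd acc then acc else acc ++ [fd])
        (if pvIsRedundant fd acc then acc else acc ++ [fd])
    rw [key]
    exact ih (if pvIsRedundant fd acc then acc else acc ++ [fd])
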